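-- pv_equiv track=rewrite | github.com/Taeyeon1607/hwpx-engine | src/hwpx_engine/editor.py | _find_toplevel_anchor
-- ===== SOURCE A (Python) =====
-- def _find_toplevel_anchor(xml_text, anchor):
--     """Find anchor text that is NOT inside a <hp:tc> element.
--
--     Returns the position of the anchor, or -1 if not found at top-level.
--     """
--     start = 0
--     while True:
--         pos = xml_text.find(anchor, start)
--         if pos < 0:
--             return -1
--         # Check if this position is inside a <hp:tc>...</hp:tc>
--         preceding = xml_text[:pos]
--         tc_opens = preceding.count('<hp:tc')
--         tc_closes = preceding.count('</hp:tc>')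
--         if tc_opens <= tc_closes:
--             # Not inside a tc — this is a valid top-level match
--             return pos
--         # Inside a tc — try next occurrence
--         start = pos + 1
-- ===== SOURCE B (Python) =====
-- def _find_toplevel_anchor(xml_text, anchor):
--     """Single linear scan: maintain running counts of '<hp:tc' / '</hp:tc>'
--     occurrences ending before each position while checking for the anchor."""
--     opens = 0
--     closes = 0
--     n = len(xml_text)
--     for i in range(n + 1):
--         if i >= 6 and xml_text[i-6:i] == '<hp:tc':
--             opens += 1
--         if i >= 8 and xml_text[i-8:i] == '</hp:tc>':
--             closes += 1
--         if opens <= closes and xml_text.startswith(anchor, i):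
--             return i
--     return -1
-- ===== Notes on version B (the rewrite author's own statement) =====
-- stated objective: alternative
-- what changed: A repeatedly calls find() and recounts both tag patterns over the whole prefix before each candidate; B makes one linear left-to-right scan, maintaining running counts of '<hp:tc'/'</hp:tc>' occurrences while testing each position for the anchor.
import Mathlib
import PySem

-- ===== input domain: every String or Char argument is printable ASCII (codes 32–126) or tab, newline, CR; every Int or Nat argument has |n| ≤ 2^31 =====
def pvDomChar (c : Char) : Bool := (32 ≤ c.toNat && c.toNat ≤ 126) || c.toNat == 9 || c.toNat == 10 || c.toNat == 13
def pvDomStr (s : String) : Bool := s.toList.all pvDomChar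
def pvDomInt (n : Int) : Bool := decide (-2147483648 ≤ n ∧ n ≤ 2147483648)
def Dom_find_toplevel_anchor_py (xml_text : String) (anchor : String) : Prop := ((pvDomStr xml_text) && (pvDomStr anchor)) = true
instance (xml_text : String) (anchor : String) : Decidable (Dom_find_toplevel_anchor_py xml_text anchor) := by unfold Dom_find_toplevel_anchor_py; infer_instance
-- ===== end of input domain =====

-- B replaces A's repeated find-and-recount-the-prefix loop by one linear scan that
-- maintains running open/close tag counts (objective: alternative algorithm).


-- the two tag literals '<hp:tc' and '</hp:tc>'
def tcOpenPat : List Char := ['<', 'h', 'p', ':', 't', 'c']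
def tcClosePat : List Char := ['<', '/', 'h', 'p', ':', 't', 'c', '>']

-- ===== PORT A =====
-- A's loop: find the next occurrence of `anchor` from `start`, count both tag
-- patterns in the preceding text with Python's str.count, stop or retry at pos+1.
-- `fuel` only makes the recursion total; it never runs out (each round strictly
-- increases `start`, which findFrom keeps ≤ length+1).
def aLoop (s a : List Char) (start : Nat) : Nat → Int
  | 0 => -1
  | fuel + 1 =>
    let pos := PySem.Chars.findFrom s a (start : Int) none
    if pos < 0 then -1
    else
      let preceding := PySem.List.slice s none (some pos)
      if PySem.Chars.count preceding tcOpenPat ≤ PySem.Chars.count preceding tcClosePat then pos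
      else aLoop s a (pos.toNat + 1) fuel

def find_toplevel_anchor_py (xml_text : String) (anchor : String) : Int :=
  aLoop xml_text.toList anchor.toList 0 (xml_text.toList.length + 2)

-- ===== PORT B =====
-- Source B's loop: for i in range(n+1), bump `opens`/`closes` when a tag occurrence
-- ends exactly at i, then test `opens <= closes and xml_text.startswith(anchor, i)`.
-- `xml_text[i-L:i] == pat` is ported as `(s.drop (i-L)).take L = pat` and
-- `startswith(anchor, i)` as `a.isPrefixOf (s.drop i)`: both exact for 0 ≤ i ≤ len.
def bLoop (s a : List Char) (opens closes i : Nat) : Int :=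
  if _h : i ≤ s.length then
    let opens' := if 6 ≤ i ∧ (s.drop (i - 6)).take 6 = tcOpenPat then opens + 1 else opens
    let closes' := if 8 ≤ i ∧ (s.drop (i - 8)).take 8 = tcClosePat then closes + 1 else closes
    if opens' ≤ closes' ∧ a.isPrefixOf (s.drop i) then (i : Int)
    else bLoop s a opens' closes' (i + 1)
  else -1
termination_by s.length + 1 - i

def find_toplevel_anchor_py_alt (xml_text : String) (anchor : String) : Int :=
  bLoop xml_text.toList anchor.toList 0 0 0

-- ===== PRECONDITION & SPEC =====
def Spec_find_toplevel_anchor_py (xml_text : String) (anchor : String) (out : Int) : Prop := out = find_toplevel_anchor_py_alt xml_text anchor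
instance (xml_text : String) (anchor : String) (out : Int) : Decidable (Spec_find_toplevel_anchor_py xml_text anchor out) := by unfold Spec_find_toplevel_anchor_py; infer_instance

-- ===== CLAIM (what is proved, stated in full; the proofs are below) =====
def Claim_equal_find_toplevel_anchor_py : Prop := ∀ (xml_text : String) (anchor : String), Dom_find_toplevel_anchor_py xml_text anchor → Spec_find_toplevel_anchor_py xml_text anchor (find_toplevel_anchor_py xml_text anchor)

-- ===== LEMMAS AND PROOFS =====

-- number of positions of `l` at which `p` occurs
def occCount (l p : List Char) : Nat :=
  (List.range l.length).countP (fun j => p.isPrefixOf (l.drop j))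

-- number of occurrences of `p` in `s` that END at a position ≤ m (what B counts)
def endCnt (s p : List Char) (m : Nat) : Nat :=
  (List.range m).countP (fun e => decide (p.length ≤ e + 1) && p.isPrefixOf (s.drop (e + 1 - p.length)))

-- reference scan: least i ∈ [start, len] passing B's test, else -1
def specF (s a : List Char) (i : Nat) : Int :=
  if i ≤ s.length then
    (if endCnt s tcOpenPat i ≤ endCnt s tcClosePat i ∧ a.isPrefixOf (s.drop i) then (i : Int)
     else specF s a (i + 1))
  else -1
termination_by s.length + 1 - i

-- `p` cannot overlap itself when its first char appears nowhere else in it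
theorem no_self_overlap {p l : List Char} {j : Nat}
    (hhead : p[0]? = some '<') (htail : ∀ k, k < p.length → 0 < k → p[k]? ≠ some '<')
    (h1 : p.isPrefixOf l = true) (hj0 : 0 < j) (hjL : j < p.length) :
    p.isPrefixOf (l.drop j) = false := by
  rw [List.isPrefixOf_iff_prefix] at h1
  by_contra h
  rw [Bool.not_eq_false, List.isPrefixOf_iff_prefix] at h
  obtain ⟨t, rfl⟩ := h1
  obtain ⟨u, hu⟩ := h
  have e2 : ((p ++ t).drop j)[0]? = p[0]? := by
    rw [← hu]
    rcases p with _ | ⟨c, q⟩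
    · simp at hjL
    · simp
  rw [List.getElem?_drop, Nat.add_zero, List.getElem?_append_left hjL] at e2
  exact htail j hjL hj0 (e2.trans hhead)

theorem occ_cons_neg {p : List Char} (h : Char) (t : List Char)
    (hnp : p.isPrefixOf (h :: t) = false) : occCount (h :: t) p = occCount t p := by
  unfold occCount
  rw [List.length_cons, List.range_succ_eq_map, List.countP_cons, List.countP_map]
  simp only [List.drop_zero, hnp]
  simp [Function.comp_def]

theorem occ_match {p : List Char} {l : List Char}
    (hne : p ≠ []) (hp : p.isPrefixOf l = true)
    (hov : ∀ (l' : List Char) j, p.isPrefixOf l' = true → 0 < j → j < p.length → p.isPrefixOf (l'.drop j) = false) :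
    occCount l p = 1 + occCount (l.drop p.length) p := by
  have hL : p.length ≤ l.length := ((List.isPrefixOf_iff_prefix).1 hp).length_le
  unfold occCount
  have hsplit : l.length = p.length + (l.length - p.length) := by omega
  rw [hsplit, List.range_add, List.countP_append, List.countP_map]
  have h1 : (List.range p.length).countP (fun j => p.isPrefixOf (l.drop j)) = 1 := by
    obtain ⟨L, hLL⟩ : ∃ L, p.length = L + 1 := ⟨p.length - 1, by have := List.length_pos_iff.2 hne; omega⟩
    rw [hLL, List.range_succ_eq_map, List.countP_cons, List.countP_map]
    simp only [List.drop_zero, hp]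
    have hz : List.countP ((fun j => p.isPrefixOf (l.drop j)) ∘ Nat.succ) (List.range L) = 0 := by
      rw [List.countP_eq_zero]
      intro a ha
      simp only [Function.comp, Nat.succ_eq_add_one]
      rw [hov l (a+1) hp (by omega) (by rw [hLL]; exact Nat.add_lt_add_right (List.mem_range.1 ha) 1)]
      simp
    simp [hz]
  rw [h1]
  congr 1
  rw [List.length_drop]
  apply List.countP_congr
  intro j _
  simp only [Function.comp]
  rw [List.drop_drop]

-- greedy non-overlapping count (Chars.count.go) = number of occurrence positions
theorem go_eq_occCount {p : List Char}
    (hhead : p[0]? = some '<') (htail : ∀ k, k < p.length → 0 < k → p[k]? ≠ some '<')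
    (hne : p ≠ []) :
    ∀ (fuel : Nat) (l : List Char) (acc : Nat), l.length ≤ fuel →
      PySem.Chars.count.go p fuel l acc = acc + occCount l p := by
  have hov : ∀ (l' : List Char) j, p.isPrefixOf l' = true → 0 < j → j < p.length → p.isPrefixOf (l'.drop j) = false :=
    fun l' j h1 hj0 hjL => no_self_overlap hhead htail h1 hj0 hjL
  intro fuel
  induction fuel with
  | zero =>
    intro l acc hl
    have : l = [] := List.length_eq_zero_iff.1 (by omega)
    subst this
    simp [PySem.Chars.count.go, occCount]
  | succ f ih =>
    intro l acc hl
    match l with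
    | [] => simp [PySem.Chars.count.go, occCount]
    | h :: t =>
      rw [PySem.Chars.count.go]
      by_cases hp : p.isPrefixOf (h :: t) = true
      · rw [if_pos hp]
        rw [ih _ _ (by simp [List.length_drop] at *; have := List.length_pos_iff.2 hne; omega)]
        rw [occ_match hne hp hov]
        omega
      · rw [if_neg hp, ih t acc (by simp at hl; omega)]
        rw [occ_cons_neg h t (eq_false_of_ne_true hp)]

theorem count_eq_occCount {p : List Char}
    (hhead : p[0]? = some '<') (htail : ∀ k, k < p.length → 0 < k → p[k]? ≠ some '<')
    (hne : p ≠ []) (l : List Char) :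
    PySem.Chars.count l p = occCount l p := by
  rw [PySem.Chars.count, if_neg (by simp [hne])]
  rw [go_eq_occCount hhead htail hne l.length l 0 le_rfl, Nat.zero_add]

-- counting with an explicit cut-off inside the predicate = counting a shorter range
theorem countP_range_cut (R : Nat → Bool) :
    ∀ (n c : Nat), c ≤ n →
      (List.range n).countP (fun j => decide (j < c) && R j) = (List.range c).countP R := by
  intro n
  induction n with
  | zero => intro c hc; interval_cases c; rfl
  | succ m ih =>
    intro c hc
    rcases Nat.lt_or_ge c (m+1) with h | h
    · rw [List.range_succ, List.countP_append, ih c (by omega)]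
      simp [Nat.not_lt_of_ge (by omega : c ≤ m)]
    · have : c = m + 1 := by omega
      subst this
      apply List.countP_congr
      intro j hj
      simp [List.mem_range.1 hj]

theorem occCount_take (s p : List Char) (m : Nat) (hm : m ≤ s.length) (hne : p ≠ []) :
    occCount (s.take m) p =
      (List.range (m + 1 - p.length)).countP (fun j => p.isPrefixOf (s.drop j)) := by
  have hpl : 0 < p.length := List.length_pos_iff.2 hne
  unfold occCount
  rw [List.length_take, Nat.min_eq_left hm]
  rw [← countP_range_cut (fun j => p.isPrefixOf (s.drop j)) m (m + 1 - p.length) (by omega)]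
  apply List.countP_congr
  intro j hj
  have hjm := List.mem_range.1 hj
  rw [List.drop_take]
  constructor
  · intro h
    have h' := (List.isPrefixOf_iff_prefix).1 h
    rw [List.prefix_take_iff] at h'
    simp only [Bool.and_eq_true, decide_eq_true_eq]
    exact ⟨by omega, (List.isPrefixOf_iff_prefix).2 h'.1⟩
  · intro h
    simp only [Bool.and_eq_true, decide_eq_true_eq] at h
    rw [List.isPrefixOf_iff_prefix, List.prefix_take_iff]
    exact ⟨(List.isPrefixOf_iff_prefix).1 h.2, by omega⟩

theorem endCnt_eq (s p : List Char) (m : Nat) (hne : p ≠ []) :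
    endCnt s p m =
      (List.range (m + 1 - p.length)).countP (fun j => p.isPrefixOf (s.drop j)) := by
  have hpl : 0 < p.length := List.length_pos_iff.2 hne
  unfold endCnt
  rcases Nat.lt_or_ge m p.length with h | h
  · have h1 : m + 1 - p.length = 0 := by omega
    rw [h1]
    simp only [List.range_zero, List.countP_nil]
    rw [List.countP_eq_zero]
    intro e he
    have := List.mem_range.1 he
    simp [Nat.not_le_of_lt (by omega : e + 1 < p.length)]
  · have hsplit : m = (p.length - 1) + (m + 1 - p.length) := by omega
    rw [hsplit, List.range_add, List.countP_append, List.countP_map]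
    have h0 : (List.range (p.length - 1)).countP (fun e => decide (p.length ≤ e + 1) && p.isPrefixOf (s.drop (e + 1 - p.length))) = 0 := by
      rw [List.countP_eq_zero]
      intro e he
      have := List.mem_range.1 he
      simp [Nat.not_le_of_lt (by omega : e + 1 < p.length)]
    rw [h0]
    simp only [Nat.zero_add]
    have hr : p.length - 1 + (m + 1 - p.length) + 1 - p.length = m + 1 - p.length := by omega
    rw [hr]
    apply List.countP_congr
    intro j hj
    simp only [Function.comp]
    have : p.length - 1 + j + 1 - p.length = j := by omega
    rw [this]
    simp [(by omega : p.length ≤ p.length - 1 + j + 1)]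

-- the bridge A needs: Python's count over the first m chars = B's running counter
theorem count_take_eq_endCnt {p : List Char}
    (hhead : p[0]? = some '<') (htail : ∀ k, k < p.length → 0 < k → p[k]? ≠ some '<')
    (hne : p ≠ []) (s : List Char) (m : Nat) (hm : m ≤ s.length) :
    PySem.Chars.count (s.take m) p = endCnt s p m := by
  rw [count_eq_occCount hhead htail hne, occCount_take s p m hm hne, endCnt_eq s p m hne]

theorem endCnt_succ (s p : List Char) (m : Nat) :
    endCnt s p (m + 1) =
      endCnt s p m + (if p.length ≤ m + 1 ∧ p.isPrefixOf (s.drop (m + 1 - p.length)) then 1 else 0) := by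
  unfold endCnt
  rw [List.range_succ, List.countP_append]
  congr 1
  simp [List.countP_cons]

-- B's slice test at step i recognises exactly "an occurrence of p ends at i"
theorem take_eq_pat_iff (x p : List Char) (L : Nat) (hL : p.length = L) :
    (x.take L = p) ↔ p.isPrefixOf x = true := by
  rw [List.isPrefixOf_iff_prefix, List.prefix_iff_eq_take, hL, eq_comm]

theorem counter_step (s p : List Char) (i L : Nat) (hL : p.length = L) (hL6 : 0 < L) (c : Nat)
    (hc : c = endCnt s p (i - 1)) :
    (if L ≤ i ∧ (s.drop (i - L)).take L = p then c + 1 else c) = endCnt s p i := by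
  rcases i with _ | m
  · rw [if_neg (by omega), hc]
  · rw [hc]
    simp only [Nat.add_sub_cancel]
    rw [endCnt_succ, hL]
    by_cases h : L ≤ m + 1 ∧ (s.drop (m + 1 - L)).take L = p
    · rw [if_pos h, if_pos ⟨h.1, (take_eq_pat_iff _ p L hL).1 h.2⟩]
    · rw [if_neg h, if_neg (by rw [take_eq_pat_iff _ p L hL] at h; exact h)]
      omega

-- B's loop is the reference scan
theorem bLoop_eq_specF (s a : List Char) :
    ∀ (k i : Nat), s.length + 1 - i ≤ k →
      bLoop s a (endCnt s tcOpenPat (i - 1)) (endCnt s tcClosePat (i - 1)) i = specF s a i := by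
  intro k
  induction k with
  | zero =>
    intro i hi
    rw [bLoop, specF]
    rw [dif_neg (by omega), if_neg (by omega)]
  | succ n ih =>
    intro i hi
    rw [bLoop, specF]
    by_cases h : i ≤ s.length
    · rw [dif_pos h, if_pos h]
      simp only
      rw [counter_step s tcOpenPat i 6 rfl (by omega) _ rfl,
          counter_step s tcClosePat i 8 rfl (by omega) _ rfl]
      by_cases ht : endCnt s tcOpenPat i ≤ endCnt s tcClosePat i ∧ a.isPrefixOf (s.drop i) = true
      · rw [if_pos ht, if_pos ht]
      · rw [if_neg ht, if_neg ht]
        have := ih (i + 1) (by omega)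
        simpa using this
    · rw [dif_neg h, if_neg h]

theorem specF_none (s a : List Char) :
    ∀ (k start : Nat), s.length + 1 - start ≤ k →
      (∀ j, start ≤ j → a.isPrefixOf (s.drop j) = false) → specF s a start = -1 := by
  intro k
  induction k with
  | zero => intro start hk _; rw [specF, if_neg (by omega)]
  | succ n ih =>
    intro start hk hnone
    rw [specF]
    by_cases h : start ≤ s.length
    · rw [if_pos h, if_neg (by rw [hnone start le_rfl]; simp)]
      exact ih (start + 1) (by omega) (fun j hj => hnone j (by omega))
    · rw [if_neg h]

theorem specF_skip (s a : List Char) :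
    ∀ (k start m : Nat), m - start ≤ k → start ≤ m → m ≤ s.length →
      (∀ j, start ≤ j → j < m → a.isPrefixOf (s.drop j) = false) →
      specF s a start = specF s a m := by
  intro k
  induction k with
  | zero => intro start m hk h1 _ _; have : start = m := by omega
            rw [this]
  | succ n ih =>
    intro start m hk h1 h2 hnone
    rcases Nat.eq_or_lt_of_le h1 with he | hlt
    · rw [he]
    · rw [specF, if_pos (by omega), if_neg (by rw [hnone start le_rfl hlt]; simp)]
      exact ih (start + 1) m (by omega) (by omega) h2 (fun j hj hjm => hnone j (by omega) hjm)

theorem findFrom_past (s a : List Char) (start : Nat) (h : s.length < start) :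
    PySem.Chars.findFrom s a (start : Int) none = -1 := by
  simp only [PySem.Chars.findFrom]
  rw [if_pos (by exact_mod_cast h)]

-- A's loop is the reference scan
theorem aLoop_eq_specF (s a : List Char) :
    ∀ (fuel start : Nat), start ≤ s.length + 1 → s.length + 1 - start < fuel →
      aLoop s a start fuel = specF s a start := by
  intro fuel
  induction fuel with
  | zero => intro start h1 h2; omega
  | succ f ih =>
    intro start h1 h2
    rcases Nat.lt_or_ge s.length start with hpast | hstart
    · rw [aLoop]
      simp only [findFrom_past s a start hpast]
      rw [if_pos (by norm_num), specF, if_neg (by omega)]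
    · rw [aLoop]
      simp only
      set pos := PySem.Chars.findFrom s a (start : Int) none with hpos
      by_cases hneg : pos < 0
      · rw [if_pos hneg]
        have hm1 : pos = -1 := by
          have := PySem.Chars.findFrom_natCast s a start hstart
          rw [← hpos] at this
          by_cases hf : PySem.Chars.find (s.drop start) a = -1
          · rw [this, if_pos hf]
          · exfalso
            have hge : 0 ≤ PySem.Chars.find (s.drop start) a := by
              have := PySem.Chars.neg_one_le_find (s.drop start) a
              omega
            rw [this, if_neg hf] at hneg
            omega
        have hnoinfix : ¬ a <:+: s.drop start :=
          (PySem.Chars.findFrom_natCast_eq_neg_one_iff s a start hstart).1 (hpos ▸ hm1)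
        refine (specF_none s a (s.length + 1 - start) start le_rfl ?_).symm
        intro j hj
        by_contra hcontra
        rw [Bool.not_eq_false, List.isPrefixOf_iff_prefix] at hcontra
        apply hnoinfix
        have hdj : s.drop j = (s.drop start).drop (j - start) := by
          rw [List.drop_drop]; congr 1; omega
        rw [hdj] at hcontra
        exact hcontra.isInfix.trans (List.drop_suffix _ _).isInfix
      · rw [if_neg hneg]
        have hne1 : pos ≠ -1 := by omega
        obtain ⟨hle, hpref, hmin⟩ := PySem.Chars.findFrom_natCast_spec s a start hstart (hpos ▸ hne1)
        rw [← hpos] at hle hpref hmin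
        have hposle : pos ≤ s.length := by
          have hff := PySem.Chars.findFrom_natCast s a start hstart
          rw [← hpos] at hff
          have hfl := PySem.Chars.find_le_length (s.drop start) a
          by_cases hf : PySem.Chars.find (s.drop start) a = -1
          · rw [hff, if_pos hf]; omega
          · rw [hff, if_neg hf]
            rw [List.length_drop] at hfl
            omega
        have hpos0 : 0 ≤ pos := by omega
        have htn : (pos.toNat : Int) = pos := Int.toNat_of_nonneg hpos0
        have htle : pos.toNat ≤ s.length := by omega
        have hslice : PySem.List.slice s none (some pos) = s.take pos.toNat :=
          PySem.List.slice_to s hpos0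
        have hskip : specF s a start = specF s a pos.toNat := by
          refine specF_skip s a (pos.toNat - start) start pos.toNat le_rfl (by omega) htle ?_
          intro j hj hjm
          exact eq_false_of_ne_true (fun hc => hmin j hj hjm ((List.isPrefixOf_iff_prefix).1 hc))
        rw [hslice,
            count_take_eq_endCnt (by decide) (by decide) (by decide) s pos.toNat htle,
            count_take_eq_endCnt (p := tcClosePat) (by decide) (by decide) (by decide) s pos.toNat htle]
        by_cases hcnt : endCnt s tcOpenPat pos.toNat ≤ endCnt s tcClosePat pos.toNat
        · rw [if_pos hcnt, hskip, specF, if_pos htle,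
              if_pos ⟨hcnt, (List.isPrefixOf_iff_prefix).2 hpref⟩, htn]
        · rw [if_neg hcnt, hskip, specF, if_pos htle,
              if_neg (by rw [List.isPrefixOf_iff_prefix]; exact fun hc => hcnt hc.1)]
          exact ih (pos.toNat + 1) (by omega) (by omega)

-- ===== VERDICT (by name: the statement is the Claim_ definition above) =====
theorem find_toplevel_anchor_py_spec : Claim_equal_find_toplevel_anchor_py := by
  intro xml_text anchor _
  show find_toplevel_anchor_py xml_text anchor = find_toplevel_anchor_py_alt xml_text anchor
  unfold find_toplevel_anchor_py find_toplevel_anchor_py_alt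
  rw [aLoop_eq_specF _ _ _ 0 (by omega) (by omega)]
  exact (bLoop_eq_specF _ _ (xml_text.toList.length + 1) 0 (by omega)).symm
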